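-- pv_equiv track=rewrite | github.com/gpilla3/CS-111 | CS111Project1_gpilla3.py | get_orf
-- ===== SOURCE A (Python) =====
-- def get_orf(DNA):
--     myList = ["TAG", "TGA", "TAA"]
--     n_DNA = range(0, len(DNA),3)
--     for index in n_DNA:
--         codon = DNA[index: index + 3]
--         if codon in myList:
--             answer = DNA[0:index]
--             return answer
-- ===== SOURCE B (Python) =====
-- def get_orf(DNA):
--     # Walk the reading frame as an iterator of complete codons (trailing
--     # partial codon dropped -- it can never be a 3-letter stop codon).
--     it = iter(DNA)
--     for i, codon in enumerate(map(''.join, zip(it, it, it))):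
--         if codon in ("TAG", "TGA", "TAA"):
--             return DNA[:3 * i]
-- ===== Notes on version B (the rewrite author's own statement) =====
-- stated objective: idiomatic
-- what changed: Replaces the index loop over range(0,len,3) with repeated slicing by an iterator pipeline (zip of one iterator thrice + enumerate) that yields complete codons directly and drops the partial tail codon, which can never be a stop.
import Mathlib
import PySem

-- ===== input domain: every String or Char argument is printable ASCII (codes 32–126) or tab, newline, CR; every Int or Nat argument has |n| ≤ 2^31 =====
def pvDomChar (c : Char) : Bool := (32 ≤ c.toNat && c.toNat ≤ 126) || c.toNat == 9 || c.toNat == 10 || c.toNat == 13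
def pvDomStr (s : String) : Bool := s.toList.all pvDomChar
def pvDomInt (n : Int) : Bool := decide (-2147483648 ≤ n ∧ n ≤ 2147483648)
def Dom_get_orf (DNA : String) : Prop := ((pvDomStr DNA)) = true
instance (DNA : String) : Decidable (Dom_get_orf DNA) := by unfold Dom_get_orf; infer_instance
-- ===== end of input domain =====

-- B replaces A's index loop with an iterator pipeline over complete codons (idiomatic); return values proved equal on all inputs.

-- ===== PORT A =====
-- the for-loop over range(0, len(DNA), 3) with early return, as structural recursion on the index list
def get_orf_loopA (DNA : String) : List Int → Option String
  | [] => none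
  | index :: rest =>
    let codon := PySem.Str.slice DNA (some index) (some (index + 3))
    if codon ∈ ["TAG", "TGA", "TAA"] then some (PySem.Str.slice DNA (some 0) (some index))
    else get_orf_loopA DNA rest

def get_orf (DNA : String) : Option String :=
  get_orf_loopA DNA (PySem.List.pyRange 0 (PySem.Str.len DNA) 3)

-- ===== PORT B =====
-- zip(it,it,it) yields complete 3-char codons in order (partial tail dropped); enumerate is the counter i
def get_orf_goB (DNA : String) : List Char → Nat → Option String
  | c1 :: c2 :: c3 :: rest, i =>
    if [c1, c2, c3] = "TAG".toList ∨ [c1, c2, c3] = "TGA".toList ∨ [c1, c2, c3] = "TAA".toList then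
      some (PySem.Str.slice DNA (some 0) (some (3 * (i : Int))))   -- DNA[:3*i]
    else get_orf_goB DNA rest (i + 1)
  | _, _ => none

def get_orf_alt (DNA : String) : Option String :=
  get_orf_goB DNA DNA.toList 0

-- ===== PRECONDITION & SPEC =====
def Spec_get_orf (DNA : String) (out : Option String) : Prop := out = get_orf_alt DNA
instance (DNA : String) (out : Option String) : Decidable (Spec_get_orf DNA out) := by unfold Spec_get_orf; infer_instance

-- ===== CLAIM (what is proved, stated in full; the proofs are below) =====
def Claim_equal_get_orf : Prop := ∀ (DNA : String), Dom_get_orf DNA → Spec_get_orf DNA (get_orf DNA)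

-- ===== LEMMAS AND PROOFS =====

lemma pyRange3_nil (a b : Int) (h : b ≤ a) : PySem.List.pyRange a b 3 = [] := by
  rw [PySem.List.pyRange_of_pos _ _ (by norm_num : (0:Int) < 3)]
  simp [not_lt.2 h]

lemma pyRange3_cons (a b : Int) (h : a < b) :
    PySem.List.pyRange a b 3 = a :: PySem.List.pyRange (a + 3) b 3 := by
  rw [PySem.List.pyRange_of_pos _ _ (by norm_num : (0:Int) < 3),
      PySem.List.pyRange_of_pos _ _ (by norm_num : (0:Int) < 3)]
  rw [if_pos h]
  by_cases h2 : a + 3 < b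
  · rw [if_pos h2]
    have hn : (b - a + 3 - 1) / 3 = (b - (a + 3) + 3 - 1) / 3 + 1 := by omega
    have hn' : ((b - (a + 3) + 3 - 1) / 3 + 1).toNat = ((b - (a + 3) + 3 - 1) / 3).toNat + 1 := by
      omega
    rw [hn, hn', List.range_succ_eq_map]
    simp only [List.map_cons, List.map_map]
    refine congrArg₂ List.cons (by norm_num) ?_
    apply List.map_congr_left
    intro k _
    simp [Function.comp]
    ring
  · rw [if_neg h2]
    have h1 : ((b - a + 3 - 1) / 3).toNat = 1 := by omega
    have h0 : ((b - (a + 3) + 3 - 1) / 3).toNat = 0 := by omega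
    rw [h1]
    simp

lemma slice_codon_eq (DNA : String) (i : Nat) :
    PySem.Str.slice DNA (some ((3 * i : Nat) : Int)) (some (((3 * i : Nat) : Int) + 3)) =
      String.ofList ((DNA.toList.drop (3 * i)).take 3) := by
  unfold PySem.Str.slice PySem.Chars.slice
  have h3 : ((3 * i : Nat) : Int) + 3 = (((3 * i + 3 : Nat)) : Int) := by push_cast; ring
  rw [h3, PySem.List.slice_natCast]
  have h4 : 3 * i + 3 - 3 * i = 3 := by omega
  rw [h4]

lemma ofList_eq_iff (l : List Char) (s : String) : String.ofList l = s ↔ l = s.toList := by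
  constructor
  · intro h; rw [← h]; simp
  · intro h; rw [h]; simp

lemma main_lemma (DNA : String) : ∀ (rest : List Char) (i : Nat),
    DNA.toList.drop (3 * i) = rest →
    get_orf_loopA DNA (PySem.List.pyRange ((3 * i : Nat) : Int) (DNA.toList.length : Int) 3) =
      get_orf_goB DNA rest i
  | c1 :: c2 :: c3 :: rest', i, h => by
    have hlen : DNA.toList.length - 3 * i = 3 + rest'.length := by
      have := congrArg List.length h
      rw [List.length_drop] at this
      simp only [List.length_cons] at this
      omega
    have ha : ((3 * i : Nat) : Int) < (DNA.toList.length : Int) := by push_cast; omega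
    rw [pyRange3_cons _ _ ha]
    show (if PySem.Str.slice DNA (some ((3 * i : Nat) : Int)) (some (((3 * i : Nat) : Int) + 3))
            ∈ ["TAG", "TGA", "TAA"]
          then some (PySem.Str.slice DNA (some 0) (some ((3 * i : Nat) : Int)))
          else get_orf_loopA DNA (PySem.List.pyRange (((3 * i : Nat) : Int) + 3) (DNA.toList.length : Int) 3))
        = get_orf_goB DNA (c1 :: c2 :: c3 :: rest') i
    rw [slice_codon_eq, h]
    have htake : (c1 :: c2 :: c3 :: rest').take 3 = [c1, c2, c3] := rfl
    rw [htake]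
    have hmem : (String.ofList [c1, c2, c3] ∈ (["TAG", "TGA", "TAA"] : List String)) ↔
        ([c1, c2, c3] = "TAG".toList ∨ [c1, c2, c3] = "TGA".toList ∨ [c1, c2, c3] = "TAA".toList) := by
      simp [ofList_eq_iff]
    by_cases hstop : [c1, c2, c3] = "TAG".toList ∨ [c1, c2, c3] = "TGA".toList ∨ [c1, c2, c3] = "TAA".toList
    · rw [if_pos (hmem.mpr hstop)]
      show _ = (if [c1, c2, c3] = "TAG".toList ∨ [c1, c2, c3] = "TGA".toList ∨ [c1, c2, c3] = "TAA".toList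
                then some (PySem.Str.slice DNA (some 0) (some (3 * (i : Int))))
                else get_orf_goB DNA rest' (i + 1))
      rw [if_pos hstop]
      have hc : (3 * (i : Int)) = ((3 * i : Nat) : Int) := by push_cast; ring
      rw [hc]
    · rw [if_neg (fun hc => hstop (hmem.mp hc))]
      show _ = (if [c1, c2, c3] = "TAG".toList ∨ [c1, c2, c3] = "TGA".toList ∨ [c1, c2, c3] = "TAA".toList
                then some (PySem.Str.slice DNA (some 0) (some (3 * (i : Int))))
                else get_orf_goB DNA rest' (i + 1))
      rw [if_neg hstop]
      have hdrop : DNA.toList.drop (3 * (i + 1)) = rest' := by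
        rw [show 3 * (i + 1) = 3 * i + 3 by ring, ← List.drop_drop, h]
        rfl
      have IH := main_lemma DNA rest' (i + 1) hdrop
      have hcast : ((3 * (i + 1) : Nat) : Int) = ((3 * i : Nat) : Int) + 3 := by push_cast; ring
      rw [hcast] at IH
      exact IH
  | [], i, h => by
    have hlen : DNA.toList.length - 3 * i = 0 := by
      have := congrArg List.length h
      rw [List.length_drop] at this
      simp only [List.length_nil] at this
      omega
    have hb : (DNA.toList.length : Int) ≤ ((3 * i : Nat) : Int) := by push_cast; omega
    rw [pyRange3_nil _ _ hb]
    rfl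
  | [c], i, h => by
    have hlen : DNA.toList.length - 3 * i = 1 := by
      have := congrArg List.length h
      rw [List.length_drop] at this
      simp only [List.length_nil, List.length_cons] at this
      omega
    have ha : ((3 * i : Nat) : Int) < (DNA.toList.length : Int) := by push_cast; omega
    rw [pyRange3_cons _ _ ha]
    show (if PySem.Str.slice DNA (some ((3 * i : Nat) : Int)) (some (((3 * i : Nat) : Int) + 3))
            ∈ ["TAG", "TGA", "TAA"]
          then some (PySem.Str.slice DNA (some 0) (some ((3 * i : Nat) : Int)))
          else get_orf_loopA DNA (PySem.List.pyRange (((3 * i : Nat) : Int) + 3) (DNA.toList.length : Int) 3))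
        = get_orf_goB DNA [c] i
    rw [slice_codon_eq, h]
    have hmem : ¬ (String.ofList ([c].take 3) ∈ (["TAG", "TGA", "TAA"] : List String)) := by
      simp [ofList_eq_iff]
    rw [if_neg hmem, pyRange3_nil _ _ (by push_cast; omega)]
    rfl
  | [c1, c2], i, h => by
    have hlen : DNA.toList.length - 3 * i = 2 := by
      have := congrArg List.length h
      rw [List.length_drop] at this
      simp only [List.length_nil, List.length_cons] at this
      omega
    have ha : ((3 * i : Nat) : Int) < (DNA.toList.length : Int) := by push_cast; omega
    rw [pyRange3_cons _ _ ha]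
    show (if PySem.Str.slice DNA (some ((3 * i : Nat) : Int)) (some (((3 * i : Nat) : Int) + 3))
            ∈ ["TAG", "TGA", "TAA"]
          then some (PySem.Str.slice DNA (some 0) (some ((3 * i : Nat) : Int)))
          else get_orf_loopA DNA (PySem.List.pyRange (((3 * i : Nat) : Int) + 3) (DNA.toList.length : Int) 3))
        = get_orf_goB DNA [c1, c2] i
    rw [slice_codon_eq, h]
    have hmem : ¬ (String.ofList ([c1, c2].take 3) ∈ (["TAG", "TGA", "TAA"] : List String)) := by
      simp [ofList_eq_iff]
    rw [if_neg hmem, pyRange3_nil _ _ (by push_cast; omega)]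
    rfl
termination_by rest => rest.length

-- ===== VERDICT (by name: the statement is the Claim_ definition above) =====
theorem get_orf_spec : Claim_equal_get_orf := by
  intro DNA _
  unfold Spec_get_orf get_orf get_orf_alt
  rw [PySem.Str.len_eq]
  have := main_lemma DNA DNA.toList 0 (by simp)
  simpa using this
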